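-- pv_equiv track=rewrite | github.com/palashkhare/metal_data_analysis | create_value_cluster.py | create_cluster
-- ===== SOURCE A (Python) =====
-- def create_cluster(arr: list, limit: int):
--     """Create cluster list of n preceding values and n exceeding values"""
--     response = []
--     for idx in range(1, len(arr)+1):
--         start_idx = idx
--         head = arr[start_idx:start_idx+limit]
--         if idx == 0:
--             tail = [0]*limit
--         else:
--             tail = arr[:start_idx-1]
--         try:
--             tail_values = tail.reverse()
--             tail_values = tail[:limit]
--         except TypeError as e:
--             len_tail = len(tail)
--             remaining = limit - len_tail
--             tail_values = [0]*remaining+tail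
--         if len(tail_values) < limit:
--             len_tail = len(tail)
--             remaining = limit - len_tail
--             tail_values = [0]*remaining+tail
--         if len(head) < limit:
--             len_head = len(head)
--             remaining = limit - len_head
--             head = [0]*remaining+head
--         response.append(head+tail_values)
--     return response
-- ===== SOURCE B (Python) =====
-- def create_cluster(arr: list, limit: int):
--     """Create cluster list of n preceding values and n exceeding values"""
--     pad = [0] * limit
--     window = []          # up to `limit` most recent earlier values, newest first
--     rows = []
--     for i, x in enumerate(arr, 1):
--         head = arr[i:i + limit]
--         rows.append(pad[len(head):] + head + pad[len(window):] + window)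
--         window = ([x] + window)[:limit]
--     return rows
-- ===== Notes on version B (the rewrite author's own statement) =====
-- stated objective: alternative
-- what changed: Instead of re-slicing and reversing the whole growing prefix at every index (plus a dead idx==0 branch and a never-firing try/except), B makes one pass maintaining an incremental newest-first window of the last `limit` seen values and front-pads head and window by slicing a shared zero pad; Pre_ excludes negative limit, a degenerate window size outside the natural domain, where A's rows are accidents of negative-slice arithmetic.
-- outside the precondition, e.g. on create_cluster([1, 2, 3], -1): A returns [[], [], [2]], B returns [[], [], []]
import Mathlib
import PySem

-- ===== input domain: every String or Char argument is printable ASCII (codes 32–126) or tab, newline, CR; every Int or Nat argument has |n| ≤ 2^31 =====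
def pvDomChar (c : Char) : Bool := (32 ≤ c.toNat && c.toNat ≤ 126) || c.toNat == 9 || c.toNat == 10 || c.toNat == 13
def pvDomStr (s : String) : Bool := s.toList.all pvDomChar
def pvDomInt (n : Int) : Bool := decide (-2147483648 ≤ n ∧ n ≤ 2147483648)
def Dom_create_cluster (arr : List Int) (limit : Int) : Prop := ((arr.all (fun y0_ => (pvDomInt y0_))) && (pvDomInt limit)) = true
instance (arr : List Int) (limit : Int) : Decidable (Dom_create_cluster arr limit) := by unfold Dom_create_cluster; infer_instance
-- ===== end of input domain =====

-- B replaces A's per-index copy-whole-prefix-reverse-truncate-pad (with a dead idx==0 branch and a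
-- never-firing try/except) by ONE pass maintaining an incremental newest-first window of the last
-- `limit` values; objective: alternative. A mutates only its local slice copy `tail`, never the
-- caller's list, so return-value equivalence is full equivalence.

-- ===== PORT A =====
def create_cluster (arr : List Int) (limit : Int) : List (List Int) :=
  (PySem.List.pyRange 1 ((arr.length : Int) + 1) 1).foldl (fun response idx =>
    let start_idx := idx
    let head := PySem.List.slice arr (some start_idx) (some (start_idx + limit))
    let tail := if idx = 0 then List.replicate limit.toNat 0
                else PySem.List.slice arr none (some (start_idx - 1))
    -- try: tail.reverse() mutates the local list and returns None; TypeError never occurs for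
    -- lists, so the except arm is dead code
    let tail := tail.reverse
    let tail_values := PySem.List.slice tail none (some limit)
    let tail_values := if (tail_values.length : Int) < limit then
        List.replicate (limit - (tail.length : Int)).toNat 0 ++ tail else tail_values
    let head := if ((head.length : Int)) < limit then
        List.replicate (limit - (head.length : Int)).toNat 0 ++ head else head
    response ++ [head ++ tail_values]) []

-- ===== PORT B =====
def create_cluster_alt (arr : List Int) (limit : Int) : List (List Int) :=
  let pad := List.replicate limit.toNat 0
  ((PySem.List.enumerate arr 1).foldl (fun (st : List Int × List (List Int)) ix =>
      let i := ix.1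
      let x := ix.2
      let window := st.1
      let rows := st.2
      let head := PySem.List.slice arr (some i) (some (i + limit))
      let rows := rows ++ [pad.drop head.length ++ head ++ pad.drop window.length ++ window]
      let window := PySem.List.slice ([x] ++ window) none (some limit)
      (window, rows)) ([], [])).2

-- ===== PRECONDITION & SPEC =====
-- Pre_ excludes negative limit, a degenerate window size outside the natural domain ("n preceding
-- values"), where A's rows are accidents of negative-slice arithmetic.
def Pre_create_cluster (arr : List Int) (limit : Int) : Prop := 0 ≤ limit
instance (arr : List Int) (limit : Int) : Decidable (Pre_create_cluster arr limit) := by unfold Pre_create_cluster; infer_instance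
def pvWitness_create_cluster : List Int × Int := ([1, 2, 3], 2)

def Spec_create_cluster (arr : List Int) (limit : Int) (out : List (List Int)) : Prop := out = create_cluster_alt arr limit
instance (arr : List Int) (limit : Int) (out : List (List Int)) : Decidable (Spec_create_cluster arr limit out) := by unfold Spec_create_cluster; infer_instance

-- ===== CLAIM =====
def Claim_equal_create_cluster : Prop := ∀ (arr : List Int) (limit : Int), Dom_create_cluster arr limit → Pre_create_cluster arr limit → Spec_create_cluster arr limit (create_cluster arr limit)

-- ===== LEMMAS AND PROOFS =====

-- B's invariant window after the first p elements
def pvWin (arr : List Int) (L p : Nat) : List Int := (arr.take p).reverse.take L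

-- one row of B at 0-based position p (limit = L ≥ 0)
def pvRow (arr : List Int) (L p : Nat) : List Int :=
  let head := (arr.drop (p + 1)).take L
  let w := pvWin arr L p
  List.replicate (L - head.length) 0 ++ head ++ List.replicate (L - w.length) 0 ++ w

-- A's conditional head padding = B's unconditional front pad (head never exceeds L)
theorem padHead (l : List Int) (L : Nat) (h : l.length ≤ L) :
    (if ((l.length : Int)) < (L : Int) then
        List.replicate ((L : Int) - (l.length : Int)).toNat 0 ++ l else l)
      = List.replicate (L - l.length) 0 ++ l := by
  by_cases hc : (l.length : Int) < (L : Int)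
  · rw [if_pos hc, show ((L : Int) - (l.length : Int)).toNat = L - l.length by omega]
  · have hl : l.length = L := by omega
    rw [if_neg hc, hl]
    simp

-- A's truncate-then-conditionally-pad of the reversed prefix = B's front pad of the window
theorem padTail (t : List Int) (L : Nat) :
    (if (((t.take L).length : Int)) < (L : Int) then
        List.replicate ((L : Int) - (t.length : Int)).toNat 0 ++ t
      else t.take L)
      = List.replicate (L - (t.take L).length) 0 ++ t.take L := by
  by_cases hc : ((t.take L).length : Int) < (L : Int)
  · have ht : t.length < L := by
      simp only [List.length_take] at hc
      omega
    have he : t.take L = t := List.take_of_length_le (by omega)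
    rw [if_pos hc, he, show ((L : Int) - (t.length : Int)).toNat = L - t.length by omega]
  · have hl : (t.take L).length = L := by
      simp only [List.length_take] at hc ⊢
      omega
    rw [if_neg hc, hl]
    simp

-- A's body at idx = p+1 produces exactly pvRow
theorem rowA_eq (arr : List Int) (L p : Nat) :
    (let start_idx := ((p : Int) + 1)
     let head := PySem.List.slice arr (some start_idx) (some (start_idx + (L : Int)))
     let tail := if ((p : Int) + 1) = 0 then List.replicate ((L : Int)).toNat 0
                 else PySem.List.slice arr none (some (start_idx - 1))
     let tail := tail.reverse
     let tail_values := PySem.List.slice tail none (some (L : Int))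
     let tail_values := if (tail_values.length : Int) < (L : Int) then
         List.replicate ((L : Int) - (tail.length : Int)).toNat 0 ++ tail else tail_values
     let head := if ((head.length : Int)) < (L : Int) then
         List.replicate ((L : Int) - (head.length : Int)).toNat 0 ++ head else head
     head ++ tail_values) = pvRow arr L p := by
  have h0 : ¬ ((p : Int) + 1 = 0) := by omega
  have e1 : ((p : Int) + 1 - 1) = ((p : Nat) : Int) := by push_cast; ring
  have ehead : PySem.List.slice arr (some ((p : Int) + 1)) (some ((p : Int) + 1 + (L : Int)))
      = (arr.drop (p + 1)).take L := by
    rw [show ((p : Int) + 1) = ((p + 1 : Nat) : Int) by push_cast; ring]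
    exact PySem.List.slice_natCast_add arr (p + 1) L
  have etail : PySem.List.slice arr none (some ((p : Nat) : Int)) = arr.take p :=
    PySem.List.slice_to_natCast arr p
  have etv : PySem.List.slice (arr.take p).reverse none (some (L : Int))
      = (arr.take p).reverse.take L := PySem.List.slice_to_natCast _ L
  simp only [if_neg h0, e1, etail, ehead, etv]
  rw [padHead ((arr.drop (p + 1)).take L) L (by simp), padTail ((arr.take p).reverse) L]
  unfold pvRow pvWin
  simp only [List.append_assoc]

-- window update: pushing arr[p] onto the front and truncating advances the invariant
theorem win_step (arr : List Int) (L p : Nat) (hp : p < arr.length) :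
    PySem.List.slice ([arr[p]] ++ pvWin arr L p) none (some (L : Int))
      = pvWin arr L (p + 1) := by
  rw [PySem.List.slice_to_natCast]
  unfold pvWin
  have h2 : (arr.take (p + 1)).reverse = arr[p] :: (arr.take p).reverse := by
    rw [List.take_add_one, List.getElem?_eq_getElem hp]
    simp
  rw [h2, List.singleton_append]
  cases L with
  | zero => simp
  | succ m =>
    simp only [List.take_succ_cons]
    rw [List.take_take, Nat.min_eq_left (by omega)]

-- the two loops, run in parallel from position p, produce the same rows
theorem loops_eq (arr : List Int) (L : Nat) :
    ∀ (p : Nat) (r : List (List Int)), p ≤ arr.length →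
    (PySem.List.pyRange ((p : Int) + 1) ((arr.length : Int) + 1) 1).foldl (fun response idx =>
      let start_idx := idx
      let head := PySem.List.slice arr (some start_idx) (some (start_idx + (L : Int)))
      let tail := if idx = 0 then List.replicate ((L : Int)).toNat 0
                  else PySem.List.slice arr none (some (start_idx - 1))
      let tail := tail.reverse
      let tail_values := PySem.List.slice tail none (some (L : Int))
      let tail_values := if (tail_values.length : Int) < (L : Int) then
          List.replicate ((L : Int) - (tail.length : Int)).toNat 0 ++ tail else tail_values
      let head := if ((head.length : Int)) < (L : Int) then
          List.replicate ((L : Int) - (head.length : Int)).toNat 0 ++ head else head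
      response ++ [head ++ tail_values]) r
    =
    ((PySem.List.enumerate (arr.drop p) ((p : Int) + 1)).foldl (fun (st : List Int × List (List Int)) ix =>
      let i := ix.1
      let x := ix.2
      let window := st.1
      let rows := st.2
      let head := PySem.List.slice arr (some i) (some (i + (L : Int)))
      let rows := rows ++ [(List.replicate ((L : Int)).toNat 0).drop head.length ++ head ++ (List.replicate ((L : Int)).toNat 0).drop window.length ++ window]
      let window := PySem.List.slice ([x] ++ window) none (some (L : Int))
      (window, rows)) (pvWin arr L p, r)).2 := by
  intro p r hp
  induction hq : arr.length - p generalizing p r with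
  | zero =>
    have hpe : p = arr.length := by omega
    subst hpe
    rw [PySem.List.pyRange_one_eq_nil (by omega), List.drop_of_length_le (by omega)]
    simp [PySem.List.enumerate]
  | succ m ih =>
    have hlt : p < arr.length := by omega
    have hcons := PySem.List.pyRange_one_cons
      (show ((p : Int) + 1) < ((arr.length : Int) + 1) by omega)
    rw [hcons]
    have hd : arr.drop p = arr[p] :: arr.drop (p + 1) :=
      (List.getElem_cons_drop hlt).symm
    rw [hd, PySem.List.enumerate_cons]
    simp only [List.foldl_cons]
    have hrowA := rowA_eq arr L p
    simp only at hrowA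
    rw [hrowA]
    -- B's appended row is pvRow too
    have hrowB : (List.replicate ((L : Int)).toNat 0).drop
          (PySem.List.slice arr (some ((p : Int) + 1)) (some ((p : Int) + 1 + (L : Int)))).length
        ++ PySem.List.slice arr (some ((p : Int) + 1)) (some ((p : Int) + 1 + (L : Int)))
        ++ (List.replicate ((L : Int)).toNat 0).drop (pvWin arr L p).length ++ pvWin arr L p
        = pvRow arr L p := by
      have ehead : PySem.List.slice arr (some ((p : Int) + 1)) (some ((p : Int) + 1 + (L : Int)))
          = (arr.drop (p + 1)).take L := by
        rw [show ((p : Int) + 1) = ((p + 1 : Nat) : Int) by push_cast; ring]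
        exact PySem.List.slice_natCast_add arr (p + 1) L
      rw [ehead]
      unfold pvRow
      simp only [Int.toNat_natCast, List.drop_replicate, List.append_assoc]
    rw [hrowB, win_step arr L p hlt]
    have e2 : ((p : Int) + 1 + 1) = (((p + 1 : Nat) : Int) + 1) := by push_cast; ring
    rw [e2]
    exact ih (p + 1) (r ++ [pvRow arr L p]) (by omega) (by omega)

-- ===== VERDICT =====
theorem create_cluster_spec : Claim_equal_create_cluster := by
  intro arr limit _ hpre
  unfold Pre_create_cluster at hpre
  obtain ⟨L, rfl⟩ : ∃ L : Nat, limit = (L : Int) := ⟨limit.toNat, by omega⟩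
  unfold Spec_create_cluster create_cluster create_cluster_alt
  have := loops_eq arr L 0 [] (by omega)
  simpa [pvWin] using this
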